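-- pv_equiv track=rewrite | github.com/Heidelberg-NLP/discourse-aware-semantic-self-attention | docqa/data/feature_extractors/sentence_span_flat_veiws.py | generate_flat_feats_and_mask
-- ===== SOURCE A (Python) =====
-- def generate_flat_feats_and_mask(inputs, span, feat_offset):
--     all_tokens_cnt = 0
--
--     # get number of tokens and sentence offsets
--     for sent_id, sent in enumerate(inputs["sentences"]):
--         all_tokens_cnt += len(sent["tokens"])
--
--     feats = []
--     mask = []
--     for view_i in range(span):
--         curr_view_feats = []
--         mask_val = 1
--         curr_view_mask = []
--         for sent_id, sent in enumerate(inputs["sentences"]):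
--             tokens_cnt = len(sent["tokens"])
--             sent_val = sent_id + view_i
--
--             curr_sent_feat = sent_val % span + feat_offset
--             sent_feats = [curr_sent_feat] * tokens_cnt
--             curr_view_feats.extend(sent_feats)
--
--             # generate mask by grouping consecutive sentences
--             curr_view_mask.extend([mask_val] * tokens_cnt)
--             if (curr_sent_feat - feat_offset) + 1 == span:
--                 mask_val += 1
--
--         feats.append(curr_view_feats)
--         mask.append(curr_view_mask)
--
--     return feats, mask
-- ===== SOURCE B (Python) =====
-- def generate_flat_feats_and_mask(inputs, span, feat_offset):
--     # per-sentence token counts, computed once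
--     counts = [len(s["tokens"]) for s in inputs["sentences"]]
--     n = len(counts)
--
--     def expand(vals):
--         # repeat each per-sentence value once per token of that sentence
--         return [v for v, c in zip(vals, counts) for _ in range(c)]
--
--     feats = [expand([(sid + view_i) % span + feat_offset for sid in range(n)])
--              for view_i in range(span)]
--     mask = []
--     for view_i in range(span):
--         # closed-form group id: 1 + number of sentence indices j < sid with
--         # j % span == (span - 1 - view_i) % span
--         r = (span - 1 - view_i) % span
--         mask.append(expand([1 + (sid - r + span - 1) // span for sid in range(n)]))
--     return feats, mask
-- ===== Notes on version B (the rewrite author's own statement) =====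
-- stated objective: alternative
-- what changed: B drops the unused token-count loop and replaces A's running mask counter and interleaved per-token extends by a per-sentence closed-form table (feature = (sid+view)%span+offset, group id = 1 + (sid-r+span-1)//span with r=(span-1-view)%span) that a separate pass expands to one value per token.
import Mathlib
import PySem

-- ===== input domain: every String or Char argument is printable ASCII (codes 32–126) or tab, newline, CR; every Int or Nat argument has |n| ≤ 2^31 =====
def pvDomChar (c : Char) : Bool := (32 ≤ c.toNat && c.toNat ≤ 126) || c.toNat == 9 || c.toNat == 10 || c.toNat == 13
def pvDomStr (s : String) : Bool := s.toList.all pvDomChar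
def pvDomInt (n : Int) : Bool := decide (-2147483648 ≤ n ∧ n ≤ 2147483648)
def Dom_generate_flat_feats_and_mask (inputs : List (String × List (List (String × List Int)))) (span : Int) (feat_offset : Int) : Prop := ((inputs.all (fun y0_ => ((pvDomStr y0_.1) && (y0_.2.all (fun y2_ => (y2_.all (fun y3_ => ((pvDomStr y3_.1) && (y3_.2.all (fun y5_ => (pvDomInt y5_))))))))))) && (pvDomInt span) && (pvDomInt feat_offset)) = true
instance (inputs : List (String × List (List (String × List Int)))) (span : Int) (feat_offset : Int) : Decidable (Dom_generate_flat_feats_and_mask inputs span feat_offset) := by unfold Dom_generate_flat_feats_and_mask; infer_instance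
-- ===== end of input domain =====

-- B replaces A's running mask counter and interleaved per-token extends by a per-sentence
-- closed-form table (feature value and group id from arithmetic) expanded to tokens in a
-- separate pass, and drops A's unused token-count loop; objective: alternative.

-- len(sent["tokens"]) — shared by both ports (dict lookup = first match, per the convention)
def pvCnt (sent : List (String × List Int)) : Nat := ((List.lookup "tokens" sent).getD []).length

-- ===== PORT A =====
-- body of A's inner sentence loop: state = (curr_view_feats, mask_val, curr_view_mask)
def pvAInner (span view_i feat_offset : Int) (st : List Int × Int × List Int)
    (p : Int × List (String × List Int)) : List Int × Int × List Int :=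
  let tokens_cnt := pvCnt p.2
  let sent_val := p.1 + view_i
  let curr_sent_feat := PySem.Int.mod sent_val span + feat_offset
  let curr_view_feats := st.1 ++ List.replicate tokens_cnt curr_sent_feat
  let curr_view_mask := st.2.2 ++ List.replicate tokens_cnt st.2.1
  let mask_val := if (curr_sent_feat - feat_offset) + 1 = span then st.2.1 + 1 else st.2.1
  (curr_view_feats, mask_val, curr_view_mask)

def generate_flat_feats_and_mask (inputs : List (String × List (List (String × List Int)))) (span : Int) (feat_offset : Int) : List (List Int) × List (List Int) :=
  let sentences := (List.lookup "sentences" inputs).getD []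
  -- A's first loop (its result is never used, kept for faithfulness)
  let _all_tokens_cnt : Int := (PySem.List.enumerate sentences 0).foldl (fun acc p => acc + (pvCnt p.2 : Int)) 0
  (PySem.List.pyRange 0 span 1).foldl
    (fun st view_i =>
      let inner := (PySem.List.enumerate sentences 0).foldl (pvAInner span view_i feat_offset) ([], 1, [])
      (st.1 ++ [inner.1], st.2 ++ [inner.2.2]))
    ([], [])

-- ===== PORT B =====
def generate_flat_feats_and_mask_alt (inputs : List (String × List (List (String × List Int)))) (span : Int) (feat_offset : Int) : List (List Int) × List (List Int) :=
  let counts := ((List.lookup "sentences" inputs).getD []).map pvCnt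
  let n : Int := counts.length
  let expand := fun (vals : List Int) => (vals.zip counts).flatMap (fun p => List.replicate p.2 p.1)
  ((PySem.List.pyRange 0 span 1).map (fun view_i =>
      expand ((PySem.List.pyRange 0 n 1).map (fun sid => PySem.Int.mod (sid + view_i) span + feat_offset))),
   (PySem.List.pyRange 0 span 1).map (fun view_i =>
      let r := PySem.Int.mod (span - 1 - view_i) span
      expand ((PySem.List.pyRange 0 n 1).map (fun sid => 1 + PySem.Int.floordiv (sid - r + span - 1) span))))

-- ===== PRECONDITION & SPEC =====
-- Pre_ excludes exactly the inputs on which the Python A raises KeyError: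
-- a missing "sentences" key, or a sentence without a "tokens" key.
def Pre_generate_flat_feats_and_mask (inputs : List (String × List (List (String × List Int)))) (span : Int) (feat_offset : Int) : Prop :=
  (List.lookup "sentences" inputs).isSome = true ∧
  ∀ sent ∈ (List.lookup "sentences" inputs).getD [], (List.lookup "tokens" sent).isSome = true
instance (inputs : List (String × List (List (String × List Int)))) (span : Int) (feat_offset : Int) : Decidable (Pre_generate_flat_feats_and_mask inputs span feat_offset) := by unfold Pre_generate_flat_feats_and_mask; infer_instance

def pvWitness_generate_flat_feats_and_mask : (List (String × List (List (String × List Int)))) × Int × Int :=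
  ([("sentences", [[("tokens", [3, 4])], [("tokens", [7])], [("tokens", [])]])], 2, 5)

def Spec_generate_flat_feats_and_mask (inputs : List (String × List (List (String × List Int)))) (span : Int) (feat_offset : Int) (out : List (List Int) × List (List Int)) : Prop := out = generate_flat_feats_and_mask_alt inputs span feat_offset
instance (inputs : List (String × List (List (String × List Int)))) (span : Int) (feat_offset : Int) (out : List (List Int) × List (List Int)) : Decidable (Spec_generate_flat_feats_and_mask inputs span feat_offset out) := by unfold Spec_generate_flat_feats_and_mask; infer_instance

-- ===== CLAIM (what is proved, stated in full; the proofs are below) =====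
def Claim_equal_generate_flat_feats_and_mask : Prop := ∀ (inputs : List (String × List (List (String × List Int)))) (span : Int) (feat_offset : Int), Dom_generate_flat_feats_and_mask inputs span feat_offset → Pre_generate_flat_feats_and_mask inputs span feat_offset → Spec_generate_flat_feats_and_mask inputs span feat_offset (generate_flat_feats_and_mask inputs span feat_offset)

-- ===== LEMMAS AND PROOFS =====

-- canonical per-view list: for each sentence (index s upward), the value fv s repeated once per token
def pvExpand (fv : Int → Int) : Int → List (List (String × List Int)) → List Int
  | _, [] => []
  | s, sent :: rest => List.replicate (pvCnt sent) (fv s) ++ pvExpand fv (s + 1) rest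

lemma pvEdivSucc (t span : Int) (h : 0 < span) :
    (t + 1) / span = t / span + (if t % span = span - 1 then 1 else 0) := by
  have hne : span ≠ 0 := by omega
  have hmod := Int.emod_nonneg t hne
  have hlt := Int.emod_lt_of_pos t h
  have ht : t + 1 = (t % span + 1) + span * (t / span) := by
    have := Int.mul_ediv_add_emod t span; omega
  rw [ht, Int.add_mul_ediv_left _ _ hne]
  split_ifs with hc
  · rw [hc]; simp [Int.ediv_self hne]; omega
  · have : (t % span + 1) / span = 0 := Int.ediv_eq_zero_of_lt (by omega) (by omega)
    omega

-- A's increment condition equals "t % span = span - 1" for t = s - r + span - 1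
lemma pvCond (span view_i s : Int) (h : 0 < span) :
    ((s + view_i) % span = span - 1) ↔
      ((s - (span - 1 - view_i) % span + span - 1) % span = span - 1) := by
  have hne : span ≠ 0 := by omega
  have hkey : (s - (span - 1 - view_i) % span + span - 1) % span = (s + view_i) % span := by
    rw [Int.emod_eq_emod_iff_emod_sub_eq_zero]
    have hd : s - (span - 1 - view_i) % span + span - 1 - (s + view_i)
        = (span - 1 - view_i) - (span - 1 - view_i) % span := by ring
    rw [hd, Int.sub_emod, Int.emod_emod_of_dvd _ (dvd_refl span)]
    simp
  rw [hkey]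

-- invariant of A's inner loop
lemma pvAInnerSpec (span view_i feat_offset : Int) (h : 0 < span)
    (ss : List (List (String × List Int))) :
    ∀ (s : Int) (accf accm : List Int),
      (PySem.List.enumerate ss s).foldl (pvAInner span view_i feat_offset)
        (accf, 1 + (s - (span - 1 - view_i) % span + span - 1) / span, accm)
      = (accf ++ pvExpand (fun i => (i + view_i) % span + feat_offset) s ss,
         1 + (s + ss.length - (span - 1 - view_i) % span + span - 1) / span,
         accm ++ pvExpand (fun i => 1 + (i - (span - 1 - view_i) % span + span - 1) / span) s ss) := by
  induction ss with
  | nil => intro s accf accm; simp [PySem.List.enumerate_nil, pvExpand]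
  | cons sent rest ih =>
    intro s accf accm
    rw [PySem.List.enumerate_cons, List.foldl_cons]
    have hstep : pvAInner span view_i feat_offset
        (accf, 1 + (s - (span - 1 - view_i) % span + span - 1) / span, accm) (s, sent)
        = (accf ++ List.replicate (pvCnt sent) ((s + view_i) % span + feat_offset),
           1 + ((s + 1) - (span - 1 - view_i) % span + span - 1) / span,
           accm ++ List.replicate (pvCnt sent)
             (1 + (s - (span - 1 - view_i) % span + span - 1) / span)) := by
      simp only [pvAInner, PySem.Int.mod_eq_emod_of_pos h]
      refine Prod.ext rfl (Prod.ext ?_ rfl)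
      simp only
      rw [show (s + 1) - (span - 1 - view_i) % span + span - 1
            = (s - (span - 1 - view_i) % span + span - 1) + 1 by ring,
        pvEdivSucc _ _ h]
      by_cases hc : (s + view_i) % span = span - 1
      · rw [if_pos (by omega), if_pos ((pvCond span view_i s h).mp hc)]; ring
      · rw [if_neg (by omega), if_neg (fun hx => hc ((pvCond span view_i s h).mpr hx))]; ring
    rw [hstep, ih (s + 1)]
    simp only [pvExpand, List.length_cons]
    refine Prod.ext (by simp) (Prod.ext ?_ (by simp))
    simp only
    congr 2
    push_cast
    ring

-- B's expansion of a range-comprehension equals pvExpand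
lemma pvBSpec (f : Int → Int) (ss : List (List (String × List Int))) :
    ∀ (s : Int),
      (((PySem.List.pyRange s (s + ss.length) 1).map f).zip (ss.map pvCnt)).flatMap
          (fun p => List.replicate p.2 p.1)
        = pvExpand f s ss := by
  induction ss with
  | nil =>
    intro s
    rw [show s + (([] : List (List (String × List Int))).length : Int) = s by simp,
      PySem.List.pyRange_one_eq_nil le_rfl]
    simp [pvExpand]
  | cons sent rest ih =>
    intro s
    rw [show s + (((sent :: rest).length : Int)) = (s + 1) + (rest.length : Int) by
      push_cast [List.length_cons]; ring]
    rw [PySem.List.pyRange_one_cons (by omega)]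
    simp only [List.map_cons, List.zip_cons_cons, List.flatMap_cons, pvExpand]
    rw [ih (s + 1)]

-- ===== VERDICT (by name: the statement is the Claim_ definition above) =====
theorem generate_flat_feats_and_mask_spec : Claim_equal_generate_flat_feats_and_mask := by
  intro inputs span feat_offset _hdom _hpre
  unfold Spec_generate_flat_feats_and_mask
  unfold generate_flat_feats_and_mask generate_flat_feats_and_mask_alt
  simp only [List.length_map]
  set S := (List.lookup "sentences" inputs).getD [] with hS
  rw [PySem.List.foldl_prod_mk
      (f := fun acc view_i => acc ++
        [((PySem.List.enumerate S 0).foldl (pvAInner span view_i feat_offset) ([], 1, [])).1])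
      (g := fun acc view_i => acc ++
        [((PySem.List.enumerate S 0).foldl (pvAInner span view_i feat_offset) ([], 1, [])).2.2]),
    PySem.List.foldl_append_singleton_eq_map, PySem.List.foldl_append_singleton_eq_map]
  refine Prod.ext ?_ ?_ <;> simp only [] <;>
    refine List.map_congr_left (fun view_i hv => ?_) <;>
    obtain ⟨hv0, hvs⟩ := (PySem.List.mem_pyRange_one).mp hv <;>
    have hsp : 0 < span := by omega
  · have hinit : (1 : Int) = 1 + ((0 : Int) - (span - 1 - view_i) % span + span - 1) / span := by
      have h0 : ((0 : Int) - (span - 1 - view_i) % span + span - 1) / span = 0 :=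
        Int.ediv_eq_zero_of_lt
          (by have := Int.emod_lt_of_pos (span - 1 - view_i) hsp; omega)
          (by have := Int.emod_nonneg (span - 1 - view_i) (by omega : span ≠ 0); omega)
      omega
    conv_lhs => rw [hinit]
    rw [pvAInnerSpec span view_i feat_offset hsp S 0 [] []]
    have hB := pvBSpec (fun sid => PySem.Int.mod (sid + view_i) span + feat_offset) S 0
    rw [show (0 : Int) + (S.length : Int) = (S.length : Int) by ring] at hB
    simp only [List.nil_append, hB]
    congr 1
    funext i
    rw [PySem.Int.mod_eq_emod_of_pos hsp]
  · have hinit : (1 : Int) = 1 + ((0 : Int) - (span - 1 - view_i) % span + span - 1) / span := by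
      have h0 : ((0 : Int) - (span - 1 - view_i) % span + span - 1) / span = 0 :=
        Int.ediv_eq_zero_of_lt
          (by have := Int.emod_lt_of_pos (span - 1 - view_i) hsp; omega)
          (by have := Int.emod_nonneg (span - 1 - view_i) (by omega : span ≠ 0); omega)
      omega
    conv_lhs => rw [hinit]
    rw [pvAInnerSpec span view_i feat_offset hsp S 0 [] []]
    have hB := pvBSpec (fun sid => 1 +
        PySem.Int.floordiv (sid - PySem.Int.mod (span - 1 - view_i) span + span - 1) span) S 0
    rw [show (0 : Int) + (S.length : Int) = (S.length : Int) by ring] at hB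
    simp only [List.nil_append, hB]
    congr 1
    funext i
    rw [PySem.Int.mod_eq_emod_of_pos hsp, PySem.Int.floordiv_eq_ediv_of_pos hsp]
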